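-- pv_equiv track=rewrite | github.com/ivan17lai/jpgCompression-work | main.py | RLC
-- ===== SOURCE A (Python) =====
-- def RLC(list):
--     result = []
--     zero_count = 0
--     for i in list[1:]:
--         if i == 0:
--             if zero_count == 15:
--                 zero_count = 0
--                 result.append((15,0))
--                 continue
--             zero_count += 1
--             continue
--         result.append((zero_count,int(i)))
--         zero_count = 0
--     # todo case All zero and last not zero
--     result.append((0,0))
--     return result
-- ===== SOURCE B (Python) =====
-- def RLC(list):
--     tail = list[1:]
--     nonzeros = [(i, v) for i, v in enumerate(tail) if v != 0]
--     result = []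
--     prev = -1
--     for i, v in nonzeros:
--         z = i - prev - 1
--         result += [(15, 0)] * (z // 16)
--         result.append((z % 16, int(v)))
--         prev = i
--     z = len(tail) - prev - 1
--     result += [(15, 0)] * (z // 16)
--     result.append((0, 0))
--     return result
-- ===== Notes on version B (the rewrite author's own statement) =====
-- stated objective: alternative
-- what changed: Replaced the incremental reset-at-16 zero counter with a gap-based pass: collect the nonzero (index,value) pairs of list[1:] once, then for each gap of z zeros emit z//16 ZRL pairs and (z%16,value) in closed form, handling the trailing-zero ZRLs the same way.
import Mathlib
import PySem

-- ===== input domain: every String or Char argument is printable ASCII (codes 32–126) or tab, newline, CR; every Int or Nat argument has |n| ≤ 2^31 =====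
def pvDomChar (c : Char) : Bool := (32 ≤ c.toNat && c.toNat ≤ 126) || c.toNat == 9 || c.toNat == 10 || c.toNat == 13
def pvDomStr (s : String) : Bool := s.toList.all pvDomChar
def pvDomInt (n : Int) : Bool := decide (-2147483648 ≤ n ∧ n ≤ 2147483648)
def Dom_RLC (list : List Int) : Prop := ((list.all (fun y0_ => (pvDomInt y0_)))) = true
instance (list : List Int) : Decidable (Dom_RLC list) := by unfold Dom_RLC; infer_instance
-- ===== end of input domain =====

-- B replaces A's incremental reset-at-16 zero counter with a single pass over the nonzero
-- (index,value) pairs of list[1:], emitting each zero gap in closed form (z//16 ZRLs, z%16 head);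
-- objective: alternative decomposition, same cost.

-- ===== PORT A =====
def RLC (list : List Int) : List (Int × Int) :=
  let s := (PySem.List.slice list (some 1) none).foldl
    (fun (st : List (Int × Int) × Int) i =>
      if i = 0 then
        if st.2 = 15 then (st.1 ++ [((15 : Int), (0 : Int))], 0)
        else (st.1, st.2 + 1)
      else (st.1 ++ [(st.2, i)], 0))
    ([], 0)
  s.1 ++ [((0 : Int), (0 : Int))]

-- ===== PORT B =====
def RLC_alt (list : List Int) : List (Int × Int) :=
  let tail := PySem.List.slice list (some 1) none
  let nonzeros := (PySem.List.enumerate tail).filter (fun p => p.2 != 0)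
  let s := nonzeros.foldl
    (fun (st : List (Int × Int) × Int) p =>
      let z := p.1 - st.2 - 1
      (st.1 ++ List.replicate (PySem.Int.floordiv z 16).toNat ((15 : Int), (0 : Int))
            ++ [(PySem.Int.mod z 16, p.2)], p.1))
    ([], -1)
  let z := (tail.length : Int) - s.2 - 1
  s.1 ++ List.replicate (PySem.Int.floordiv z 16).toNat ((15 : Int), (0 : Int)) ++ [((0 : Int), (0 : Int))]

-- ===== PRECONDITION & SPEC =====
def Spec_RLC (list : List Int) (out : List (Int × Int)) : Prop := out = RLC_alt list
instance (list : List Int) (out : List (Int × Int)) : Decidable (Spec_RLC list out) := by unfold Spec_RLC; infer_instance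

-- ===== CLAIM (what is proved, stated in full; the proofs are below) =====
def Claim_equal_RLC : Prop := ∀ (list : List Int), Dom_RLC list → Spec_RLC list (RLC list)

-- ===== LEMMAS AND PROOFS =====

-- A's loop as a structural recursion on the tail, carrying the zero counter.
def fA : List Int → Int → List (Int × Int)
  | [], _ => []
  | i :: t, zc =>
    if i = 0 then
      if zc = 15 then ((15 : Int), (0 : Int)) :: fA t 0 else fA t (zc + 1)
    else (zc, i) :: fA t 0

-- B's gap logic as a structural recursion, carrying the current zero-gap length.
def fB : List Int → Int → List (Int × Int)
  | [], z => List.replicate (PySem.Int.floordiv z 16).toNat ((15 : Int), (0 : Int))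
  | i :: t, z =>
    if i = 0 then fB t (z + 1)
    else List.replicate (PySem.Int.floordiv z 16).toNat ((15 : Int), (0 : Int))
           ++ (PySem.Int.mod z 16, i) :: fB t 0

-- the loop bodies of the two ports, as named functions (definitionally equal to the lambdas)
def stepA : (List (Int × Int) × Int) → Int → (List (Int × Int) × Int) := fun st i =>
  if i = 0 then
    if st.2 = 15 then (st.1 ++ [((15 : Int), (0 : Int))], 0)
    else (st.1, st.2 + 1)
  else (st.1 ++ [(st.2, i)], 0)

def stepB : (List (Int × Int) × Int) → (Int × Int) → (List (Int × Int) × Int) := fun st p =>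
  let z := p.1 - st.2 - 1
  (st.1 ++ List.replicate (PySem.Int.floordiv z 16).toNat ((15 : Int), (0 : Int))
        ++ [(PySem.Int.mod z 16, p.2)], p.1)

theorem foldA_fst (t : List Int) : ∀ (acc : List (Int × Int)) (zc : Int),
    (t.foldl stepA (acc, zc)).1 = acc ++ fA t zc := by
  induction t with
  | nil => intro acc zc; simp [fA]
  | cons i t ih =>
    intro acc zc
    by_cases h : i = 0
    · by_cases h15 : zc = 15 <;> simp [fA, stepA, h, h15, List.foldl_cons, ih]
    · simp [fA, stepA, h, List.foldl_cons, ih]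

theorem fB_add16 (t : List Int) : ∀ (z : Int), 0 ≤ z →
    fB t (z + 16) = ((15 : Int), (0 : Int)) :: fB t z := by
  induction t with
  | nil =>
    intro z hz
    simp only [fB, PySem.Int.floordiv_eq_ediv_of_pos (show (0:Int) < 16 by omega)]
    rw [show ((z + 16) / 16).toNat = (z / 16).toNat + 1 by omega]
    simp [List.replicate_succ]
  | cons i t ih =>
    intro z hz
    by_cases h : i = 0
    · simp only [fB, h, if_true]
      rw [show z + 16 + 1 = z + 1 + 16 by ring, ih (z + 1) (by omega)]
    · simp only [fB, h, if_false,
        PySem.Int.floordiv_eq_ediv_of_pos (show (0:Int) < 16 by omega),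
        PySem.Int.mod_eq_emod_of_pos (show (0:Int) < 16 by omega)]
      rw [show ((z + 16) / 16).toNat = (z / 16).toNat + 1 by omega,
          show (z + 16) % 16 = z % 16 by omega]
      simp [List.replicate_succ]

theorem fA_eq_fB (t : List Int) : ∀ (zc : Int), 0 ≤ zc → zc ≤ 15 → fA t zc = fB t zc := by
  induction t with
  | nil =>
    intro zc h0 h15
    simp only [fA, fB, PySem.Int.floordiv_eq_ediv_of_pos (show (0:Int) < 16 by omega)]
    rw [show (zc / 16).toNat = 0 by omega]
    simp
  | cons i t ih =>
    intro zc h0 h15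
    by_cases h : i = 0
    · by_cases hzc : zc = 15
      · have h16 := fB_add16 t 0 le_rfl
        simp only [fA, fB, h, hzc, if_true]
        rw [ih 0 le_rfl (by omega)]
        simpa using h16.symm
      · simp only [fA, fB, h, hzc, if_true, if_false]
        exact ih (zc + 1) (by omega) (by omega)
    · simp only [fA, fB, h, if_false,
        PySem.Int.floordiv_eq_ediv_of_pos (show (0:Int) < 16 by omega),
        PySem.Int.mod_eq_emod_of_pos (show (0:Int) < 16 by omega)]
      rw [show (zc / 16).toNat = 0 by omega, show zc % 16 = zc by omega,
          ih 0 le_rfl (by omega)]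
      simp

theorem foldB (t : List Int) : ∀ (n prev L : Int) (acc : List (Int × Int)),
    prev + 1 ≤ n → L = n + (t.length : Int) →
    (((PySem.List.enumerate t n).filter (fun p => p.2 != 0)).foldl stepB (acc, prev)).1
      ++ List.replicate (PySem.Int.floordiv
            (L - (((PySem.List.enumerate t n).filter (fun p => p.2 != 0)).foldl stepB (acc, prev)).2 - 1)
            16).toNat ((15 : Int), (0 : Int))
    = acc ++ fB t (n - prev - 1) := by
  induction t with
  | nil =>
    intro n prev L acc h hL
    simp only [PySem.List.enumerate_nil, List.filter_nil, List.foldl_nil, fB]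
    rw [show L - prev - 1 = n - prev - 1 by simp at hL; omega]
  | cons i t ih =>
    intro n prev L acc h hL
    have hL' : L = (n + 1) + (t.length : Int) := by rw [List.length_cons] at hL; push_cast at hL ⊢; omega
    by_cases hi : i = 0
    · rw [show (PySem.List.enumerate (i :: t) n).filter (fun p => p.2 != 0)
            = (PySem.List.enumerate t (n + 1)).filter (fun p => p.2 != 0) by
          simp [PySem.List.enumerate_cons, hi]]
      rw [ih (n + 1) prev L acc (by omega) hL']
      simp only [fB, hi, if_true]
      rw [show n - prev - 1 + 1 = n + 1 - prev - 1 by ring]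
    · rw [show (PySem.List.enumerate (i :: t) n).filter (fun p => p.2 != 0)
            = (n, i) :: (PySem.List.enumerate t (n + 1)).filter (fun p => p.2 != 0) by
          simp [PySem.List.enumerate_cons, hi]]
      rw [List.foldl_cons]
      rw [show stepB (acc, prev) (n, i)
            = (acc ++ List.replicate (PySem.Int.floordiv (n - prev - 1) 16).toNat ((15:Int),(0:Int))
                   ++ [(PySem.Int.mod (n - prev - 1) 16, i)], n) from rfl]
      rw [ih (n + 1) n L _ (by omega) hL']
      rw [show n + 1 - n - 1 = (0 : Int) by ring]
      simp [fB, hi, List.append_assoc]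

theorem RLC_eq_fA (list : List Int) :
    RLC list = fA (PySem.List.slice list (some 1) none) 0 ++ [((0 : Int), (0 : Int))] := by
  show ((PySem.List.slice list (some 1) none).foldl stepA ([], 0)).1 ++ [((0:Int),(0:Int))] = _
  rw [foldA_fst]
  simp

theorem RLC_alt_eq_fB (list : List Int) :
    RLC_alt list = fB (PySem.List.slice list (some 1) none) 0 ++ [((0 : Int), (0 : Int))] := by
  have H := foldB (PySem.List.slice list (some 1) none) 0 (-1)
      ((PySem.List.slice list (some 1) none).length : Int) [] (by omega) (by ring)
  rw [show (0 : Int) - (-1) - 1 = 0 by ring] at H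
  show (((PySem.List.enumerate (PySem.List.slice list (some 1) none)).filter (fun p => p.2 != 0)).foldl
          stepB ([], -1)).1
    ++ List.replicate (PySem.Int.floordiv
          (((PySem.List.slice list (some 1) none).length : Int)
            - (((PySem.List.enumerate (PySem.List.slice list (some 1) none)).filter (fun p => p.2 != 0)).foldl
                stepB ([], -1)).2 - 1) 16).toNat ((15 : Int), (0 : Int))
        ++ [((0 : Int), (0 : Int))] = _
  rw [H]
  simp

-- ===== VERDICT (by name: the statement is the Claim_ definition above) =====
theorem RLC_spec : Claim_equal_RLC := by
  intro list _
  unfold Spec_RLC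
  rw [RLC_eq_fA, RLC_alt_eq_fB, fA_eq_fB _ 0 le_rfl (by omega)]
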